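-- pv_equiv track=rewrite | github.com/jung-jinyoung/OurAlgoStudy | jinyoung/240902/모의테스트/섬연결.py | solution
-- ===== SOURCE A (Python) =====
-- def solution(n, costs):
--     info = [[0] * n for _ in range(n)]
--
--     min_start = 0  ## 가장 작은 비용이 드는 섬
--     min_sum = 0
--
--     for s, t, cost in costs:
--         info[s][t] = cost
--         info[t][s] = cost
--
--     for idx in range(n):
--         if min_sum == 0:
--             min_sum = sum(info[idx])
--             min_start = idx
--
--         if sum(info[idx]) < min_sum:
--             min_start = idx
--             min_sum = sum(info[idx])
--
--     ## 가장 작은 다리 건설 비용이 드는 섬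
--     ## 해당 섬에 최종 비용 answer 에 추가
--     answer = min_sum
--
--     # 현재 이어진 섬
--     arrival = [idx for idx in range(n) if info[min_start][idx] != 0]
--     arrival.append(min_start)
--
--     # 해당 섬에서 도달하지 않는 섬
--     not_arrival = [idx for idx in range(n) if idx != min_start and info[min_start][idx] == 0]
--
--     connected = [[0] * n for _ in range(n)]
--
--     for temp in not_arrival:
--         arr = []
--
--         for idx in range(n):
--             if info[temp][idx] > 0 and idx != temp:
--                 arr.append([temp, idx, info[temp][idx]])
--
--         arr.sort(key=lambda x: (x[2], x[0], [1]))
--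
--         for start, end, cost in arr:
--             if connected[start][end] == 0:
--                 answer += cost
--                 connected[start][end] = 1
--                 connected[end][start] = 1
--                 break
--     return answer
-- ===== SOURCE B (Python) =====
-- def solution(n, costs):
--     info = [[0] * n for _ in range(n)]
--     for s, t, cost in costs:
--         info[s][t] = cost
--         info[t][s] = cost
--
--     sums = [sum(row) for row in info]
--     min_start, min_sum = 0, 0
--     for idx, rs in enumerate(sums):
--         if min_sum == 0 or rs < min_sum:
--             min_start, min_sum = idx, rs
--
--     answer = min_sum
--     connected = set()
--     for temp in range(n):
--         if temp == min_start or info[min_start][temp] != 0: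
--             continue
--         best = None
--         for idx, c in enumerate(info[temp]):
--             if c > 0 and idx != temp and (min(temp, idx), max(temp, idx)) not in connected:
--                 if best is None or c < best[1]:
--                     best = (idx, c)
--         if best is not None:
--             answer += best[1]
--             connected.add((min(temp, best[0]), max(temp, best[0])))
--     return answer
-- ===== Notes on version B (the rewrite author's own statement) =====
-- stated objective: simpler
-- what changed: The dead 'arrival' list is dropped, row sums are computed once into a list and the two-if minimum loop becomes one condition, the connected matrix becomes a set of normalized index pairs, and the per-island build-list/sort/scan-for-first-eligible step is replaced by a single linear minimum scan with the same cost-then-index tie-break.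
import Mathlib
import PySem

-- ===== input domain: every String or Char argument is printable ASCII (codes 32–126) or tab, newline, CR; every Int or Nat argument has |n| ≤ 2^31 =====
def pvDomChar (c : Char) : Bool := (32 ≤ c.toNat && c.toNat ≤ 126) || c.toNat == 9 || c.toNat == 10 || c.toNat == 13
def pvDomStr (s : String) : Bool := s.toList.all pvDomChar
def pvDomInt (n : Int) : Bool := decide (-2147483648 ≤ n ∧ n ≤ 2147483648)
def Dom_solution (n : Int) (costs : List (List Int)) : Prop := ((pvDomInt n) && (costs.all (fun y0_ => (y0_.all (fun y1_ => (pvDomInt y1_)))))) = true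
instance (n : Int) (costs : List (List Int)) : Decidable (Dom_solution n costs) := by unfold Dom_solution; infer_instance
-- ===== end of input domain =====

-- B is a simpler same-cost rewrite: dead code dropped, row sums precomputed, the connected
-- matrix replaced by a set of index pairs, and the per-island build/sort/first-eligible step
-- replaced by one linear minimum scan with the same cost-then-index tie-break.

-- ===== PORT A =====

-- shared by both ports: both Pythons build `info` with the identical matrix-filling loop
def buildInfo (n : Int) (costs : List (List Int)) : List (List Int) :=
  let init := (PySem.List.pyRange 0 n 1).map (fun _ => List.replicate n.toNat (0 : Int))
  costs.foldl (fun info r =>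
    let s := PySem.List.pyGetD r 0 0
    let t := PySem.List.pyGetD r 1 0
    let c := PySem.List.pyGetD r 2 0
    let info := PySem.List.pySetD info s (PySem.List.pySetD (PySem.List.pyGetD info s []) t c)
    PySem.List.pySetD info t (PySem.List.pySetD (PySem.List.pyGetD info t []) s c)) init

def aMinStep (info : List (List Int)) (st : Int × Int) (idx : Int) : Int × Int :=
  let st := if st.2 = 0 then (idx, (PySem.List.pyGetD info idx []).sum) else st
  if (PySem.List.pyGetD info idx []).sum < st.2 then (idx, (PySem.List.pyGetD info idx []).sum) else st

def aArrStep (info : List (List Int)) (temp : Int) (arr : List (Int × Int × Int)) (idx : Int) :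
    List (Int × Int × Int) :=
  if 0 < PySem.List.pyGetD (PySem.List.pyGetD info temp []) idx 0 ∧ idx ≠ temp then
    arr ++ [(temp, idx, PySem.List.pyGetD (PySem.List.pyGetD info temp []) idx 0)]
  else arr

-- the `for start, end, cost in arr: … break` loop
def firstPick : List (Int × Int × Int) → Int → List (List Int) → Int × List (List Int)
  | [], answer, connected => (answer, connected)
  | (s, e, c) :: rest, answer, connected =>
    if PySem.List.pyGetD (PySem.List.pyGetD connected s []) e 0 = 0 then
      let connected := PySem.List.pySetD connected s
        (PySem.List.pySetD (PySem.List.pyGetD connected s []) e 1)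
      let connected := PySem.List.pySetD connected e
        (PySem.List.pySetD (PySem.List.pyGetD connected e []) s 1)
      (answer + c, connected)
    else firstPick rest answer connected

def aTempStep (info : List (List Int)) (n : Int) (st : Int × List (List Int)) (temp : Int) :
    Int × List (List Int) :=
  let arr := (PySem.List.pyRange 0 n 1).foldl (aArrStep info temp) []
  -- key (x[2], x[0], [1]): the third component is the constant list [1], which never affects
  -- the tuple comparison, so the key is ported as the two-component sorted2
  let arr := PySem.List.sorted2 arr (fun x => x.2.2) (fun x => x.1)
  firstPick arr st.1 st.2

def solution (n : Int) (costs : List (List Int)) : Int :=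
  let info := buildInfo n costs
  let p := (PySem.List.pyRange 0 n 1).foldl (aMinStep info) (0, 0)
  let min_start := p.1
  let min_sum := p.2
  let answer := min_sum
  let _arrival := ((PySem.List.pyRange 0 n 1).filter
      (fun idx => decide (PySem.List.pyGetD (PySem.List.pyGetD info min_start []) idx 0 ≠ 0)))
      ++ [min_start]
  let not_arrival := (PySem.List.pyRange 0 n 1).filter
      (fun idx => decide (idx ≠ min_start ∧ PySem.List.pyGetD (PySem.List.pyGetD info min_start []) idx 0 = 0))
  let connected := (PySem.List.pyRange 0 n 1).map (fun _ => List.replicate n.toNat (0 : Int))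
  (not_arrival.foldl (aTempStep info n) (answer, connected)).1

-- ===== PORT B =====

def bMinStep (st : Int × Int) (x : Int × Int) : Int × Int :=
  if st.2 = 0 ∨ x.2 < st.2 then (x.1, x.2) else st

def bBestStep (temp : Int) (S : PySem.Set (Int × Int)) (best : Option (Int × Int))
    (x : Int × Int) : Option (Int × Int) :=
  if 0 < x.2 ∧ x.1 ≠ temp ∧ ¬ PySem.Set.contains S (min temp x.1, max temp x.1) = true then
    match best with
    | none => some x
    | some b => if x.2 < b.2 then some x else best
  else best

def bTempStep (info : List (List Int)) (min_start : Int)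
    (st : Int × PySem.Set (Int × Int)) (temp : Int) : Int × PySem.Set (Int × Int) :=
  if temp = min_start ∨ PySem.List.pyGetD (PySem.List.pyGetD info min_start []) temp 0 ≠ 0 then st
  else
    let best := (PySem.List.enumerate (PySem.List.pyGetD info temp [])).foldl
      (bBestStep temp st.2) none
    match best with
    | none => st
    | some b => (st.1 + b.2, PySem.Set.add st.2 (min temp b.1, max temp b.1))

def solution_alt (n : Int) (costs : List (List Int)) : Int :=
  let info := buildInfo n costs
  let sums := info.map List.sum
  let p := (PySem.List.enumerate sums).foldl bMinStep (0, 0)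
  let min_start := p.1
  let answer := p.2
  ((PySem.List.pyRange 0 n 1).foldl (bTempStep info min_start) (answer, PySem.Set.empty)).1

-- ===== PRECONDITION & SPEC =====
-- Pre_ excludes exactly the inputs where the Python A raises: an edge triple that is not a
-- 3-element list (ValueError on unpacking) or whose two endpoint indices are not valid Python
-- indices into the n-row matrix (IndexError).
def Pre_solution (n : Int) (costs : List (List Int)) : Prop :=
  ∀ r ∈ costs, r.length = 3 ∧
    PySem.Raise.InRange n.toNat (PySem.List.pyGetD r 0 0) ∧
    PySem.Raise.InRange n.toNat (PySem.List.pyGetD r 1 0)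
instance (n : Int) (costs : List (List Int)) : Decidable (Pre_solution n costs) := by
  unfold Pre_solution; infer_instance

def pvWitness_solution : Int × List (List Int) := (4, [[0, 1, 1], [0, 2, 2], [1, 2, 5], [1, 3, 1]])

def Spec_solution (n : Int) (costs : List (List Int)) (out : Int) : Prop := out = solution_alt n costs
instance (n : Int) (costs : List (List Int)) (out : Int) : Decidable (Spec_solution n costs out) := by
  unfold Spec_solution; infer_instance

-- ===== CLAIM (what is proved, stated in full; the proofs are below) =====
def Claim_equal_solution : Prop := ∀ (n : Int) (costs : List (List Int)),
  Dom_solution n costs → Pre_solution n costs → Spec_solution n costs (solution n costs)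


-- ===== LEMMAS AND PROOFS =====

-- generic: two folds over the same list preserve a relation between their states
theorem pvFoldRel {α σ τ : Type} (R : σ → τ → Prop) (f : σ → α → σ) (g : τ → α → τ)
    (l : List α) (h : ∀ s t a, a ∈ l → R s t → R (f s a) (g t a)) :
    ∀ {s : σ} {t : τ}, R s t → R (l.foldl f s) (l.foldl g t) := by
  induction l with
  | nil => intro s t hst; exact hst
  | cons x xs ih =>
    intro s t hst
    exact ih (fun s t a ha => h s t a (List.mem_cons_of_mem _ ha)) (h s t x (List.mem_cons_self) hst)

-- one step of B's linear minimum scan, generic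
def selMinStep {α : Type} (lt : α → α → Bool) (p : α → Bool) (best : Option α) (x : α) : Option α :=
  if p x then
    match best with
    | none => some x
    | some b => if lt x b then some x else best
  else best

theorem pvSelMinStep_congr {α : Type} (lt : α → α → Bool) (p p' : α → Bool)
    (best : Option α) (x : α) (h : p x = p' x) :
    selMinStep lt p best x = selMinStep lt p' best x := by
  unfold selMinStep
  rw [h]

theorem pvInsertBy_pairwise {α : Type} (lt : α → α → Bool)
    (htr : ∀ a b c, lt a b = true → lt b c = true → lt a c = true)
    (hasym : ∀ a b, lt a b = true → lt b a = false) :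
    ∀ (s : List α) (x : α), s.Pairwise (fun a b => lt b a = false) →
      (PySem.List.insertBy lt x s).Pairwise (fun a b => lt b a = false) := by
  intro s
  induction s with
  | nil => intro x _; simp [PySem.List.insertBy]
  | cons z s ih =>
    intro x hp
    rw [List.pairwise_cons] at hp
    obtain ⟨hz, hs⟩ := hp
    by_cases h : lt x z = true
    · simp only [PySem.List.insertBy, h, if_pos]
      refine List.Pairwise.cons ?_ (List.Pairwise.cons hz hs)
      intro b hb
      rcases List.mem_cons.mp hb with rfl | hb
      · exact hasym _ _ h
      · by_contra hc
        simp only [Bool.not_eq_false] at hc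
        exact absurd (htr _ _ _ hc h) (by simp [hz b hb])
    · simp only [PySem.List.insertBy, h, if_neg, Bool.false_eq_true, not_false_iff]
      refine List.Pairwise.cons ?_ (ih x hs)
      intro b hb
      have := PySem.List.mem_insertBy (before := lt) (x := x) (ys := s) (y := b)
      rcases this.mp hb with rfl | hb
      · simpa using h
      · exact hz b hb


theorem pvFind?_insertBy {α : Type} (lt : α → α → Bool)
    (hneg : ∀ a b c, lt a b = false → lt b c = false → lt a c = false) (p : α → Bool) :
    ∀ (s : List α) (x : α), s.Pairwise (fun a b => lt b a = false) →
      (PySem.List.insertBy lt x s).find? p = selMinStep lt p (s.find? p) x := by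
  intro s
  induction s with
  | nil => intro x _; simp [PySem.List.insertBy, selMinStep]
  | cons z s ih =>
    intro x hp
    rw [List.pairwise_cons] at hp
    obtain ⟨hz, hs⟩ := hp
    by_cases h : lt x z = true
    · simp only [PySem.List.insertBy, h, if_pos]
      -- list is x :: z :: s
      rw [List.find?_cons]
      by_cases hpx : p x = true
      · simp only [hpx, cond_true, selMinStep]
        cases hf : List.find? p (z :: s) with
        | none => simp [hpx]
        | some m =>
          have hm : m ∈ z :: s := List.mem_of_find?_eq_some hf
          have hxm : lt x m = true := by
            rcases List.mem_cons.mp hm with rfl | hm'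
            · exact h
            · by_contra hc
              have hc' : lt x m = false := by simpa using hc
              have := hneg _ _ _ hc' (hz m hm')
              rw [h] at this; exact absurd this (by simp)
          simp [hpx, hxm]
      · have hpx' : p x = false := by simpa using hpx
        simp only [hpx', cond_false, selMinStep]
        cases hf : List.find? p (z :: s) with
        | none => simp [hpx', hf]
        | some m => simp [hpx', hf]
    · have h' : lt x z = false := by simpa using h
      simp only [PySem.List.insertBy, h', if_neg, Bool.false_eq_true, not_false_iff]
      rw [List.find?_cons, List.find?_cons]
      by_cases hpz : p z = true
      · simp only [hpz, cond_true, selMinStep]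
        by_cases hpx : p x = true
        · simp [hpx, h']
        · simp [show p x = false by simpa using hpx]
      · have hpz' : p z = false := by simpa using hpz
        simp only [hpz', cond_false]
        exact ih x hs



-- the first eligible element of the stable sort is the eligible element found by the
-- earliest-minimum linear scan
theorem pvFind?_sortFold {α : Type} (lt : α → α → Bool)
    (htr : ∀ a b c, lt a b = true → lt b c = true → lt a c = true)
    (hasym : ∀ a b, lt a b = true → lt b a = false)
    (hneg : ∀ a b c, lt a b = false → lt b c = false → lt a c = false)
    (p : α → Bool) (l : List α) :
    (l.foldl (fun acc x => PySem.List.insertBy lt x acc) []).find? p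
      = l.foldl (selMinStep lt p) none := by
  have hpw : ∀ l : List α,
      (l.foldl (fun acc x => PySem.List.insertBy lt x acc) []).Pairwise (fun a b => lt b a = false) := by
    intro l
    induction l using List.reverseRecOn with
    | nil => simp
    | append_singleton l x ih =>
      rw [List.foldl_append]
      simp only [List.foldl_cons, List.foldl_nil]
      exact pvInsertBy_pairwise lt htr hasym _ x ih
  induction l using List.reverseRecOn with
  | nil => simp
  | append_singleton l x ih =>
    rw [List.foldl_append, List.foldl_append]
    simp only [List.foldl_cons, List.foldl_nil]
    rw [pvFind?_insertBy lt hneg p _ x (hpw l), ih]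


theorem pvInsertBy_congr {α : Type} (lt lt' : α → α → Bool) (x : α) :
    ∀ (s : List α), (∀ b ∈ s, lt x b = lt' x b) →
      PySem.List.insertBy lt x s = PySem.List.insertBy lt' x s := by
  intro s
  induction s with
  | nil => intro _; rfl
  | cons z s ih =>
    intro h
    simp only [PySem.List.insertBy]
    rw [h z (List.mem_cons_self)]
    by_cases hz : lt' x z = true
    · simp [hz]
    · simp only [hz, if_neg, Bool.false_eq_true, not_false_iff]
      rw [ih (fun b hb => h b (List.mem_cons_of_mem _ hb))]


theorem pvSortFold_congr {α : Type} (lt lt' : α → α → Bool) :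
    ∀ (l acc : List α),
      (∀ a b, (a ∈ l ∨ a ∈ acc) → (b ∈ l ∨ b ∈ acc) → lt a b = lt' a b) →
      l.foldl (fun acc x => PySem.List.insertBy lt x acc) acc
        = l.foldl (fun acc x => PySem.List.insertBy lt' x acc) acc := by
  intro l
  induction l with
  | nil => intro acc _; rfl
  | cons x xs ih =>
    intro acc h
    rw [List.foldl_cons, List.foldl_cons]
    rw [pvInsertBy_congr lt lt' x acc
      (fun b hb => h x b (Or.inl List.mem_cons_self) (Or.inr hb))]
    apply ih
    intro a b ha hb
    have hmem : ∀ c, c ∈ PySem.List.insertBy lt' x acc → c ∈ x :: xs ∨ c ∈ acc := by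
      intro c hc
      rcases (PySem.List.mem_insertBy _ _ _ _).mp hc with rfl | hc
      · exact Or.inl List.mem_cons_self
      · exact Or.inr hc
    rcases ha with ha | ha
    · rcases hb with hb | hb
      · exact h a b (Or.inl (List.mem_cons_of_mem _ ha)) (Or.inl (List.mem_cons_of_mem _ hb))
      · exact h a b (Or.inl (List.mem_cons_of_mem _ ha)) (hmem b hb)
    · rcases hb with hb | hb
      · exact h a b (hmem a ha) (Or.inl (List.mem_cons_of_mem _ hb))
      · exact h a b (hmem a ha) (hmem b hb)


theorem pvSelMin_map {α β : Type} (g : α → β) (lt : β → β → Bool) (p : β → Bool) :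
    ∀ (l : List α) (b : Option α),
      (l.map g).foldl (selMinStep lt p) (b.map g)
        = (l.foldl (selMinStep (fun a b => lt (g a) (g b)) (fun a => p (g a))) b).map g := by
  intro l
  induction l with
  | nil => intro b; rfl
  | cons x xs ih =>
    intro b
    rw [List.map_cons, List.foldl_cons, List.foldl_cons]
    have hstep : selMinStep lt p (b.map g) (g x)
        = (selMinStep (fun a b => lt (g a) (g b)) (fun a => p (g a)) b x).map g := by
      simp only [selMinStep]
      by_cases hp : p (g x) = true
      · simp only [hp, if_pos]
        cases b with
        | none => rfl
        | some b0 =>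
          simp only [Option.map_some]
          by_cases hlt : lt (g x) (g b0) = true
          · simp [hlt]
          · simp [hlt]
      · simp [hp]
    rw [hstep, ih]


theorem pvSelMin_mem {α : Type} (lt : α → α → Bool) (p : α → Bool) :
    ∀ (l : List α) (b0 : Option α) (b : α),
      l.foldl (selMinStep lt p) b0 = some b → b0 = some b ∨ b ∈ l := by
  intro l
  induction l with
  | nil => intro b0 b h; exact Or.inl h
  | cons x xs ih =>
    intro b0 b h
    rw [List.foldl_cons] at h
    rcases ih _ b h with hs | hm
    · simp only [selMinStep] at hs
      by_cases hp : p x = true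
      · simp only [hp, if_pos] at hs
        cases b0 with
        | none => simp at hs; exact Or.inr (by simp [hs])
        | some c =>
          by_cases hlt : lt x c = true
          · simp [hlt] at hs; exact Or.inr (by simp [hs])
          · simp [hlt] at hs; exact Or.inl (by simp [hs])
      · simp only [hp] at hs
        exact Or.inl (by simpa using hs)
    · exact Or.inr (List.mem_cons_of_mem _ hm)


-- marking one directed matrix entry, as firstPick does
def mark (M : List (List Int)) (s e : Int) : List (List Int) :=
  PySem.List.pySetD M s (PySem.List.pySetD (PySem.List.pyGetD M s []) e 1)

theorem pvFirstPick_eq_find? (l : List (Int × Int × Int)) (ans : Int) (M : List (List Int)) :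
    firstPick l ans M
      = match l.find? (fun e => decide (PySem.List.pyGetD (PySem.List.pyGetD M e.1 []) e.2.1 0 = 0)) with
        | none => (ans, M)
        | some e => (ans + e.2.2, mark (mark M e.1 e.2.1) e.2.1 e.1) := by
  induction l with
  | nil => rfl
  | cons hd tl ih =>
    obtain ⟨s, e, c⟩ := hd
    rw [List.find?_cons]
    by_cases h : PySem.List.pyGetD (PySem.List.pyGetD M s []) e 0 = 0
    · simp only [firstPick, h, if_pos, decide_true, cond_true, mark]
    · simp only [firstPick, h, if_neg, not_false_iff, decide_false, cond_false]
      exact ih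

theorem pvMem_pySetD {α : Type} (xs : List α) (i : Int) (v : α) :
    ∀ y ∈ PySem.List.pySetD xs i v, y ∈ xs ∨ (y = v ∧ PySem.Raise.InRange xs.length i) := by
  intro y hy
  unfold PySem.List.pySetD PySem.List.pySet? at hy
  cases h : PySem.List.pyIdx? xs.length i with
  | none => rw [h] at hy; simp at hy; exact Or.inl hy
  | some k =>
    have hr : PySem.Raise.InRange xs.length i := by
      unfold PySem.List.pyIdx? at h
      unfold PySem.Raise.InRange
      split_ifs at h <;> omega
    rw [h] at hy; simp at hy
    rcases List.mem_or_eq_of_mem_set hy with h' | h'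
    · exact Or.inl h'
    · exact Or.inr ⟨h', hr⟩

-- setting entry (a, b) preserves the n×n shape
theorem pvSetRow_shape (N : Nat) (info : List (List Int)) (hlen : info.length = N)
    (hrows : ∀ row ∈ info, row.length = N) (a b : Int) (v : Int) :
    (PySem.List.pySetD info a (PySem.List.pySetD (PySem.List.pyGetD info a []) b v)).length = N ∧
    ∀ row ∈ PySem.List.pySetD info a (PySem.List.pySetD (PySem.List.pyGetD info a []) b v),
      row.length = N := by
  refine ⟨by rw [PySem.List.length_pySetD, hlen], ?_⟩
  intro row hrow
  rcases pvMem_pySetD _ _ _ row hrow with h | ⟨rfl, hr⟩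
  · exact hrows row h
  · rw [PySem.List.length_pySetD]
    cases hg : PySem.List.pyGet? info a with
    | none =>
      rw [PySem.List.pyGet?_eq_none_iff] at hg
      rw [hlen] at hg
      rw [← hlen] at hg
      exact absurd hr hg
    | some r =>
      have : PySem.List.pyGetD info a [] = r := by
        unfold PySem.List.pyGetD; rw [hg]; rfl
      rw [this]
      exact hrows r (PySem.List.mem_of_pyGet?_eq_some info hg)


-- shape of the cost matrix: n rows of length n (pySetD out of range is a no-op)
theorem pvBuildInfo_shape (n : Int) (costs : List (List Int)) :
    (buildInfo n costs).length = n.toNat ∧ ∀ row ∈ buildInfo n costs, row.length = n.toNat := by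
  unfold buildInfo
  have hinit : ((PySem.List.pyRange 0 n 1).map (fun _ => List.replicate n.toNat (0 : Int))).length = n.toNat ∧
      ∀ row ∈ (PySem.List.pyRange 0 n 1).map (fun _ => List.replicate n.toNat (0 : Int)),
        row.length = n.toNat := by
    constructor
    · rw [List.length_map, PySem.List.length_pyRange_one]; simp
    · intro row hr
      rcases List.mem_map.mp hr with ⟨_, _, rfl⟩
      simp
  generalize (PySem.List.pyRange 0 n 1).map (fun _ => List.replicate n.toNat (0 : Int)) = init at hinit ⊢
  induction costs generalizing init with
  | nil => exact hinit
  | cons r costs ih =>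
    rw [List.foldl_cons]
    apply ih
    have h1 := pvSetRow_shape n.toNat init hinit.1 hinit.2 (PySem.List.pyGetD r 0 0)
      (PySem.List.pyGetD r 1 0) (PySem.List.pyGetD r 2 0)
    exact pvSetRow_shape n.toNat _ h1.1 h1.2 (PySem.List.pyGetD r 1 0)
      (PySem.List.pyGetD r 0 0) (PySem.List.pyGetD r 2 0)

-- the two minimum-row loops compute the same pair
theorem pvMinFold_eq (info : List (List Int)) :
    ∀ (pre suf : List (List Int)), info = pre ++ suf → ∀ st : Int × Int,
      (PySem.List.pyRange (↑pre.length) (↑info.length) 1).foldl (aMinStep info) st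
        = (PySem.List.enumerate (suf.map List.sum) (↑pre.length)).foldl bMinStep st := by
  intro pre suf
  induction suf generalizing pre with
  | nil =>
    intro h st
    rw [List.append_nil] at h
    subst h
    rw [PySem.List.pyRange_one_eq_nil (le_refl _)]
    rfl
  | cons row suf ih =>
    intro h st
    have hlt : (pre.length : Int) < (info.length : Int) := by
      rw [h]; simp
    rw [PySem.List.pyRange_one_cons hlt, List.foldl_cons]
    rw [List.map_cons, PySem.List.enumerate_cons, List.foldl_cons]
    have hget : PySem.List.pyGetD info (↑pre.length) [] = row := by
      unfold PySem.List.pyGetD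
      rw [h, PySem.List.pyGet?_append_length]
      rfl
    have hstep : aMinStep info st (↑pre.length) = bMinStep st (↑pre.length, row.sum) := by
      unfold aMinStep bMinStep
      rw [hget]
      by_cases h0 : st.2 = 0
      · simp [h0]
      · by_cases h1 : row.sum < st.2 <;> simp [h0, h1]
    rw [hstep]
    have := ih (pre ++ [row]) (by rw [h]; simp) (bMinStep st (↑pre.length, row.sum))
    simpa using this

-- A's candidate-building loop produces the filtered enumeration, mapped to triples
theorem pvArrFold_eq (info : List (List Int)) (temp : Int) (row : List Int)
    (hrow : row = PySem.List.pyGetD info temp []) :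
    ∀ (pre suf : List Int), row = pre ++ suf → ∀ acc,
      (PySem.List.pyRange (↑pre.length) (↑row.length) 1).foldl (aArrStep info temp) acc
        = acc ++ ((PySem.List.enumerate suf (↑pre.length)).filter
            (fun x => decide (0 < x.2 ∧ x.1 ≠ temp))).map (fun x => (temp, x.1, x.2)) := by
  intro pre suf
  induction suf generalizing pre with
  | nil =>
    intro h acc
    rw [List.append_nil] at h
    subst h
    rw [PySem.List.pyRange_one_eq_nil (le_refl _)]
    simp [PySem.List.enumerate]
  | cons c suf ih =>
    intro h acc
    have hlt : (pre.length : Int) < (row.length : Int) := by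
      rw [h]; simp
    rw [PySem.List.pyRange_one_cons hlt, List.foldl_cons]
    rw [PySem.List.enumerate_cons]
    have hget : PySem.List.pyGetD row (↑pre.length) 0 = c := by
      unfold PySem.List.pyGetD
      rw [h, PySem.List.pyGet?_append_length]
      rfl
    have hih := ih (pre ++ [c]) (by rw [h]; simp)
    simp only [List.length_append, List.length_cons, List.length_nil, Nat.cast_add,
      Nat.cast_one, Nat.cast_zero, zero_add] at hih
    by_cases hc : 0 < c ∧ (pre.length : Int) ≠ temp
    · have hstep : aArrStep info temp acc (↑pre.length) = acc ++ [(temp, (pre.length : Int), c)] := by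
        unfold aArrStep
        rw [← hrow, hget]
        simp [hc]
      rw [hstep, List.filter_cons]
      simp only [hc, decide_true, cond_true, List.map_cons]
      rw [hih]
      simp [hc.2]
    · have hstep : aArrStep info temp acc (↑pre.length) = acc := by
        unfold aArrStep
        rw [← hrow, hget]
        simp [hc]
      rw [hstep, List.filter_cons]
      simp only [hc, decide_false, cond_false]
      exact hih acc

-- the invariant tying A's 0/1 matrix to B's set of normalized pairs
def ConnRel (N : Nat) (M : List (List Int)) (S : List (Int × Int)) : Prop :=
  M.length = N ∧ (∀ row ∈ M, row.length = N) ∧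
  ∀ i j : Int, 0 ≤ i → i < (N : Int) → 0 ≤ j → j < (N : Int) →
    (PySem.List.pyGetD (PySem.List.pyGetD M i []) j 0 = 0 ↔ ¬ ((min i j, max i j) ∈ S))

theorem pvGetD_mark (N : Nat) (M : List (List Int)) (hlen : M.length = N)
    (hrows : ∀ row ∈ M, row.length = N) (a b i j : Int)
    (ha0 : 0 ≤ a) (ha : a < (N : Int)) (hb0 : 0 ≤ b) (hb : b < (N : Int))
    (hi0 : 0 ≤ i) (hi : i < (N : Int)) (hj0 : 0 ≤ j) (hj : j < (N : Int)) :
    PySem.List.pyGetD (PySem.List.pyGetD (mark M a b) i []) j 0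
      = if i = a ∧ j = b then 1 else PySem.List.pyGetD (PySem.List.pyGetD M i []) j 0 := by
  have hMi : i < (M.length : Int) := by rw [hlen]; exact hi
  have hMa : a < (M.length : Int) := by rw [hlen]; exact ha
  have hmark : mark M a b = M.set a.toNat ((PySem.List.pyGetD M a []).set b.toNat 1) := by
    unfold mark
    rw [PySem.List.pySetD_of_nonneg _ _ hb0, PySem.List.pySetD_of_nonneg _ _ ha0]
  have hMarow : PySem.List.pyGetD M a [] = M[a.toNat]'(by omega) :=
    PySem.List.pyGetD_eq_getElem M [] ha0 hMa
  have hrowlen : ∀ (k : Nat) (h : k < M.length), (M[k]'h).length = N := by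
    intro k h
    exact hrows _ (List.getElem_mem h)
  rw [hmark]
  rw [PySem.List.pyGetD_eq_getElem _ [] hi0 (by simpa using hMi)]
  rw [List.getElem_set]
  by_cases hia : i = a
  · subst hia
    rw [if_pos (by omega)]
    rw [hMarow]
    have hjr : j < ((M[i.toNat]'(by omega)).length : Int) := by rw [hrowlen]; exact hj
    have hlen2 : j < (((M[i.toNat]'(by omega)).set b.toNat 1).length : Int) := by
      rw [List.length_set]; exact hjr
    rw [PySem.List.pyGetD_eq_getElem _ 0 hj0 hlen2]
    rw [List.getElem_set]
    by_cases hjb : j = b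
    · subst hjb
      rw [if_pos (by omega), if_pos ⟨rfl, rfl⟩]
    · rw [if_neg (by omega), if_neg (by simp [hjb])]
      rw [PySem.List.pyGetD_eq_getElem _ 0 hj0 hjr]
  · rw [if_neg (by omega), if_neg (by simp [hia])]
    rw [PySem.List.pyGetD_eq_getElem M [] hi0 hMi]

theorem pvMark_shape' (N : Nat) (M : List (List Int)) (hlen : M.length = N)
    (hrows : ∀ row ∈ M, row.length = N) (a b : Int) :
    (mark M a b).length = N ∧ ∀ row ∈ mark M a b, row.length = N := by
  unfold mark
  exact pvSetRow_shape N M hlen hrows a b 1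

theorem pvConnRel_update (N : Nat) (M : List (List Int)) (S : List (Int × Int))
    (h : ConnRel N M S) (s e : Int)
    (hs0 : 0 ≤ s) (hs : s < (N : Int)) (he0 : 0 ≤ e) (he : e < (N : Int)) :
    ConnRel N (mark (mark M s e) e s) (PySem.Set.add S (min s e, max s e)) := by
  obtain ⟨hlen, hrows, hiff⟩ := h
  have h1 := pvMark_shape' N M hlen hrows s e
  have h2 := pvMark_shape' N (mark M s e) h1.1 h1.2 e s
  refine ⟨h2.1, h2.2, ?_⟩
  intro i j hi0 hi hj0 hj
  rw [pvGetD_mark N (mark M s e) h1.1 h1.2 e s i j he0 he hs0 hs hi0 hi hj0 hj]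
  rw [pvGetD_mark N M hlen hrows s e i j hs0 hs he0 he hi0 hi hj0 hj]
  rw [PySem.Set.mem_add]
  have hpair : ((min i j, max i j) = (min s e, max s e)) ↔ ((i = s ∧ j = e) ∨ (i = e ∧ j = s)) := by
    constructor
    · intro hp
      have hp1 := congrArg Prod.fst hp
      have hp2 := congrArg Prod.snd hp
      simp only [] at hp1 hp2
      omega
    · intro hp
      rcases hp with ⟨rfl, rfl⟩ | ⟨rfl, rfl⟩
      · rfl
      · rw [min_comm, max_comm]
  by_cases hc1 : i = e ∧ j = s
  · rw [if_pos hc1]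
    constructor
    · intro h10; exact absurd h10 (by norm_num)
    · intro hmem; exact absurd (Or.inr (hpair.mpr (Or.inr hc1))) hmem
  · rw [if_neg hc1]
    by_cases hc2 : i = s ∧ j = e
    · rw [if_pos hc2]
      constructor
      · intro h10; exact absurd h10 (by norm_num)
      · intro hmem; exact absurd (Or.inr (hpair.mpr (Or.inl hc2))) hmem
    · rw [if_neg hc2]
      rw [hiff i j hi0 hi hj0 hj]
      constructor
      · intro hnm hor
        rcases hor with hm | hp
        · exact hnm hm
        · rcases hpair.mp hp with h' | h' <;> [exact hc2 h'; exact hc1 h']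
      · intro hnor hm
        exact hnor (Or.inl hm)

-- the per-island bodies agree and preserve the invariant
theorem pvTempStep_eq (N : Nat) (info : List (List Int)) (hil : info.length = N)
    (hirows : ∀ row ∈ info, row.length = N) (ms : Int) (ans : Int)
    (M : List (List Int)) (S : List (Int × Int)) (temp : Int)
    (hR : ConnRel N M S) (h0 : 0 ≤ temp) (hN : temp < (N : Int))
    (hcond : temp ≠ ms ∧ PySem.List.pyGetD (PySem.List.pyGetD info ms []) temp 0 = 0) :
    (aTempStep info (↑N) (ans, M) temp).1 = (bTempStep info ms (ans, S) temp).1 ∧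
    ConnRel N (aTempStep info (↑N) (ans, M) temp).2 (bTempStep info ms (ans, S) temp).2 := by
  obtain ⟨hMl, hMrows, hMiff⟩ := hR
  have hskip : ¬ (temp = ms ∨ PySem.List.pyGetD (PySem.List.pyGetD info ms []) temp 0 ≠ 0) := by
    push_neg
    exact ⟨hcond.1, hcond.2⟩
  have hrowlen : (PySem.List.pyGetD info temp []).length = N := by
    have hmem : PySem.List.pyGetD info temp [] ∈ info := by
      apply PySem.List.pyGetD_mem
      rw [hil]
      exact ⟨by omega, hN⟩
    exact hirows _ hmem
  -- abbreviations
  set row := PySem.List.pyGetD info temp [] with hrow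
  set g : Int × Int → Int × Int × Int := fun x => (temp, x.1, x.2) with hg
  set lt2 : Int × Int × Int → Int × Int × Int → Bool :=
    fun a b => decide (a.2.2 < b.2.2) || (!decide (b.2.2 < a.2.2) && decide (a.1 < b.1)) with hlt2
  set ltc : Int × Int × Int → Int × Int × Int → Bool := fun a b => decide (a.2.2 < b.2.2) with hltc
  set pM : Int × Int × Int → Bool :=
    fun e => decide (PySem.List.pyGetD (PySem.List.pyGetD M e.1 []) e.2.1 0 = 0) with hpM
  set cand := (PySem.List.enumerate row 0).filter (fun x => decide (0 < x.2 ∧ x.1 ≠ temp)) with hcand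
  have hcand_bounds : ∀ x ∈ cand, 0 ≤ x.1 ∧ x.1 < (N : Int) := by
    intro x hx
    have hx' : x ∈ PySem.List.enumerate row 0 := List.mem_of_mem_filter hx
    rcases (PySem.List.mem_enumerate_iff _ _ _).mp hx' with ⟨k, hk, rfl⟩
    constructor
    · simp
    · simp only [zero_add]
      rw [← hrowlen]
      exact_mod_cast hk
  -- A's candidate list
  have harr : (PySem.List.pyRange 0 (↑N) 1).foldl (aArrStep info temp) [] = cand.map g := by
    have h := pvArrFold_eq info temp row hrow [] row (by simp) []
    simp only [List.length_nil, Nat.cast_zero, List.nil_append] at h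
    rw [hrowlen] at h
    exact h
  -- properties of the cost-only comparison
  have htr : ∀ a b c, ltc a b = true → ltc b c = true → ltc a c = true := by
    intro a b c h1 h2; simp only [hltc, decide_eq_true_eq] at *; omega
  have hasym : ∀ a b, ltc a b = true → ltc b a = false := by
    intro a b h1; simp only [hltc, decide_eq_true_eq, decide_eq_false_iff_not] at *; omega
  have hneg : ∀ a b c, ltc a b = false → ltc b c = false → ltc a c = false := by
    intro a b c h1 h2; simp only [hltc, decide_eq_false_iff_not] at *; omega
  -- the stable two-key sort is the fold of insertions with lt2
  have hsorted2 : ∀ l : List (Int × Int × Int),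
      PySem.List.sorted2 l (fun x => x.2.2) (fun x => x.1)
        = l.foldl (fun acc x => PySem.List.insertBy lt2 x acc) [] := fun l => rfl
  -- on arr all first components are temp, so lt2 = ltc there
  have hcongr : (cand.map g).foldl (fun acc x => PySem.List.insertBy lt2 x acc) []
      = (cand.map g).foldl (fun acc x => PySem.List.insertBy ltc x acc) [] := by
    apply pvSortFold_congr
    intro a b ha hb
    have ha1 : a.1 = temp := by
      rcases ha with ha | ha
      · rcases List.mem_map.mp ha with ⟨x, _, rfl⟩; rfl
      · simp at ha
    have hb1 : b.1 = temp := by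
      rcases hb with hb | hb
      · rcases List.mem_map.mp hb with ⟨x, _, rfl⟩; rfl
      · simp at hb
    simp [hlt2, hltc, ha1, hb1]
  -- B's scan is the filtered min-scan
  have hbb : ∀ (best : Option (Int × Int)) (x : Int × Int),
      bBestStep temp S best x
        = if decide (0 < x.2 ∧ x.1 ≠ temp) = true then
            selMinStep (fun a b => ltc (g a) (g b))
              (fun y => decide (¬ PySem.Set.contains S (min temp y.1, max temp y.1) = true)) best x
          else best := by
    intro best x
    unfold bBestStep selMinStep
    by_cases h1 : 0 < x.2
    · by_cases h2 : x.1 ≠ temp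
      · by_cases h3 : PySem.Set.contains S (min temp x.1, max temp x.1) = true
        · by_cases hmem : (min temp x.1, max temp x.1) ∈ S
          all_goals simp [h1, h2, hltc, hg, hmem]
          all_goals cases best <;> simp
        · by_cases hmem : (min temp x.1, max temp x.1) ∈ S
          all_goals simp [h1, h2, hltc, hg, hmem]
          all_goals cases best <;> simp
      · simp [h1, h2]
    · simp [h1]
  have hBfold : (PySem.List.enumerate row 0).foldl (bBestStep temp S) none
      = cand.foldl (selMinStep (fun a b => ltc (g a) (g b))
          (fun y => decide (¬ PySem.Set.contains S (min temp y.1, max temp y.1) = true))) none := by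
    have h1 : (PySem.List.enumerate row 0).foldl (bBestStep temp S) none
        = (PySem.List.enumerate row 0).foldl (fun best x =>
            if decide (0 < x.2 ∧ x.1 ≠ temp) = true then
              selMinStep (fun a b => ltc (g a) (g b))
                (fun y => decide (¬ PySem.Set.contains S (min temp y.1, max temp y.1) = true)) best x
            else best) none := by
      apply PySem.List.foldl_congr_mem
      intro acc x _
      exact hbb acc x
    rw [h1, PySem.List.foldl_if_eq_foldl_filter]
  -- on cand the set test agrees with the matrix test
  have hpred : cand.foldl (selMinStep (fun a b => ltc (g a) (g b))
          (fun y => decide (¬ PySem.Set.contains S (min temp y.1, max temp y.1) = true))) none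
      = cand.foldl (selMinStep (fun a b => ltc (g a) (g b)) (fun y => pM (g y))) none := by
    apply PySem.List.foldl_congr_mem
    intro acc x hx
    have hb := hcand_bounds x hx
    have hiff := hMiff temp x.1 h0 hN hb.1 hb.2
    have : decide (¬ PySem.Set.contains S (min temp x.1, max temp x.1) = true) = pM (g x) := by
      simp only [hpM, hg]
      rw [decide_eq_decide]
      rw [PySem.Set.contains_iff]
      constructor
      · intro hnm
        exact hiff.mpr hnm
      · intro h0'
        exact hiff.mp h0'
    exact pvSelMinStep_congr _ _ _ acc x this
  -- assemble
  have hA : aTempStep info (↑N) (ans, M) temp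
      = match (cand.foldl (selMinStep (fun a b => ltc (g a) (g b)) (fun y => pM (g y))) none).map g with
        | none => (ans, M)
        | some e => (ans + e.2.2, mark (mark M e.1 e.2.1) e.2.1 e.1) := by
    show firstPick (PySem.List.sorted2 ((PySem.List.pyRange 0 (↑N) 1).foldl (aArrStep info temp) [])
      (fun x => x.2.2) (fun x => x.1)) ans M = _
    rw [harr, hsorted2, hcongr, pvFirstPick_eq_find?]
    rw [show (fun e : Int × Int × Int =>
      decide (PySem.List.pyGetD (PySem.List.pyGetD M e.1 []) e.2.1 0 = 0)) = pM from rfl]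
    rw [pvFind?_sortFold ltc htr hasym hneg pM]
    rw [show (none : Option (Int × Int × Int)) = Option.map g none from rfl]
    rw [pvSelMin_map g ltc pM cand none]
  have hB : bTempStep info ms (ans, S) temp
      = match cand.foldl (selMinStep (fun a b => ltc (g a) (g b)) (fun y => pM (g y))) none with
        | none => (ans, S)
        | some b => (ans + b.2, PySem.Set.add S (min temp b.1, max temp b.1)) := by
    show (if temp = ms ∨ PySem.List.pyGetD (PySem.List.pyGetD info ms []) temp 0 ≠ 0 then (ans, S)
      else _) = _
    rw [if_neg hskip]
    simp only
    rw [← hrow, hBfold, hpred]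
  rw [hA, hB]
  cases hbest : cand.foldl (selMinStep (fun a b => ltc (g a) (g b)) (fun y => pM (g y))) none with
  | none => exact ⟨rfl, hMl, hMrows, hMiff⟩
  | some b =>
    have hbmem : b ∈ cand := by
      rcases pvSelMin_mem _ _ cand none b hbest with h' | h'
      · exact absurd h' (by simp)
      · exact h'
    have hbb' := hcand_bounds b hbmem
    simp only [Option.map_some, hg]
    refine ⟨by trivial, ?_⟩
    exact pvConnRel_update N M S ⟨hMl, hMrows, hMiff⟩ temp b.1 h0 hN hbb'.1 hbb'.2

theorem pvZeroGetD (r : List Int) (hz : ∀ y ∈ r, y = 0) (j : Int) :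
    PySem.List.pyGetD r j 0 = 0 := by
  unfold PySem.List.pyGetD
  cases h : PySem.List.pyGet? r j with
  | none => rfl
  | some y => exact hz y (PySem.List.mem_of_pyGet?_eq_some r h)

theorem pvConnRel_init (n : Int) :
    ConnRel n.toNat ((PySem.List.pyRange 0 n 1).map (fun _ => List.replicate n.toNat (0 : Int)))
      [] := by
  refine ⟨by simp [PySem.List.length_pyRange_one], ?_, ?_⟩
  · intro row hr
    rcases List.mem_map.mp hr with ⟨_, _, rfl⟩
    simp
  · intro i j _ _ _ _
    have hz : ∀ y ∈ PySem.List.pyGetD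
        ((PySem.List.pyRange 0 n 1).map (fun _ => List.replicate n.toNat (0 : Int))) i
        ([] : List Int), y = (0 : Int) := by
      intro y hy
      unfold PySem.List.pyGetD at hy
      cases hmem : PySem.List.pyGet?
          ((PySem.List.pyRange 0 n 1).map (fun _ => List.replicate n.toNat (0 : Int))) i with
      | none => rw [hmem] at hy; simp at hy
      | some row =>
        rw [hmem] at hy
        simp only [Option.getD_some] at hy
        have hrm := PySem.List.mem_of_pyGet?_eq_some _ hmem
        rcases List.mem_map.mp hrm with ⟨_, _, rfl⟩
        exact List.eq_of_mem_replicate hy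
    rw [pvZeroGetD _ hz j]
    simp

-- ===== VERDICT (by name: the statement is the Claim_ definition above) =====
theorem solution_spec : Claim_equal_solution := by
  unfold Claim_equal_solution
  intro n costs _ _
  unfold Spec_solution
  simp only [solution, solution_alt]
  have hshape := pvBuildInfo_shape n costs
  set info := buildInfo n costs with hinfo
  set N := n.toNat with hNdef
  have hpr : PySem.List.pyRange 0 n 1 = PySem.List.pyRange 0 (↑N) 1 := by
    by_cases hn : 0 ≤ n
    · rw [hNdef, Int.toNat_of_nonneg hn]
    · rw [PySem.List.pyRange_one_eq_nil (by omega), PySem.List.pyRange_one_eq_nil (by omega)]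
  have hp : (PySem.List.pyRange 0 n 1).foldl (aMinStep info) (0, 0)
      = (PySem.List.enumerate (info.map List.sum) 0).foldl bMinStep (0, 0) := by
    have h := pvMinFold_eq info [] info rfl (0, 0)
    simp only [List.length_nil, Nat.cast_zero] at h
    have hl : ((info.length : Nat) : Int) = ((N : Nat) : Int) := by rw [hshape.1]
    rw [hl, ← hpr] at h
    exact h
  rw [hp]
  set p := (PySem.List.enumerate (info.map List.sum) 0).foldl bMinStep (0, 0) with hpdef
  by_cases hn : 0 < n
  · have hn' : n = (N : Int) := by rw [hNdef]; omega
    -- B's skipping fold is the fold over A's not_arrival list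
    have hB : (PySem.List.pyRange 0 n 1).foldl (bTempStep info p.1) (p.2, PySem.Set.empty)
        = ((PySem.List.pyRange 0 n 1).filter
            (fun idx => decide (idx ≠ p.1 ∧
              PySem.List.pyGetD (PySem.List.pyGetD info p.1 []) idx 0 = 0))).foldl
            (bTempStep info p.1) (p.2, PySem.Set.empty) := by
      rw [← PySem.List.foldl_if_eq_foldl_filter]
      apply PySem.List.foldl_congr_mem
      intro acc x _
      by_cases hq : x ≠ p.1 ∧ PySem.List.pyGetD (PySem.List.pyGetD info p.1 []) x 0 = 0
      · simp [hq]
      · rw [if_neg (by simpa using hq)]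
        show bTempStep info p.1 acc x = acc
        unfold bTempStep
        rw [if_pos (by tauto)]
    rw [hB]
    have hfold := pvFoldRel (fun (s : Int × List (List Int)) (t : Int × PySem.Set (Int × Int)) =>
        s.1 = t.1 ∧ ConnRel N s.2 t.2) (aTempStep info n) (bTempStep info p.1)
      ((PySem.List.pyRange 0 n 1).filter
        (fun idx => decide (idx ≠ p.1 ∧
          PySem.List.pyGetD (PySem.List.pyGetD info p.1 []) idx 0 = 0)))
      (by
        intro s t a ha hRst
        have hmem := List.mem_of_mem_filter ha
        have hq := List.of_mem_filter ha
        rw [decide_eq_true_eq] at hq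
        have hbounds := PySem.List.mem_pyRange_one.mp hmem
        have hstep := pvTempStep_eq N info hshape.1 hshape.2 p.1 s.1 s.2 t.2 a hRst.2
          hbounds.1 (by omega) hq
        rw [← hn'] at hstep
        rw [show (s.1, s.2) = s from rfl] at hstep
        rw [hRst.1] at hstep
        rw [show (t.1, t.2) = t from rfl] at hstep
        exact ⟨hstep.1, hstep.2⟩)
      (s := (p.2, (PySem.List.pyRange 0 n 1).map (fun _ => List.replicate N (0 : Int))))
      (t := (p.2, PySem.Set.empty))
      ⟨rfl, by rw [hNdef]; exact pvConnRel_init n⟩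
    exact hfold.1
  · rw [PySem.List.pyRange_one_eq_nil (by omega)]
    simp
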